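-- pv_equiv track=rewrite | github.com/pypi-data/pypi-mirror-317 | packages/primalscheme3/primalscheme3-3.0.3-py3-none-any.whl/primalscheme3/core/reduce_kmers.py | primer_dist
-- ===== SOURCE A (Python) =====
-- def primer_dist(s1: str, s2: str, dist_3p=5, score_3p=10) -> int:
--     """
--     Returns a score of primer similarity. If the mutation is within the last `dist_3p` bases, the score is 1 * `score_3p`
--     """
--     score = 0
--     for index, (x, y) in enumerate(zip(s1[::-1], s2[::-1])):
--         if x != y:
--             if index < dist_3p:
--                 score += score_3p
--             else:
--                 score += 1
--
--     return score
-- ===== SOURCE B (Python) =====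
-- def primer_dist(s1: str, s2: str, dist_3p=5, score_3p=10) -> int:
--     n = min(len(s1), len(s2))
--     t1 = s1[len(s1) - n:]
--     t2 = s2[len(s2) - n:]
--     total = sum(a != b for a, b in zip(t1, t2))
--     k = max(0, min(n, dist_3p))
--     near = sum(a != b for a, b in zip(t1[n - k:], t2[n - k:]))
--     return total + (score_3p - 1) * near
-- ===== Notes on version B (the rewrite author's own statement) =====
-- stated objective: simpler
-- what changed: Replaces A's per-position enumerate-and-branch loop over the reversed strings with two region-level mismatch counts (whole overlap of the last min-length characters, and the clamped 3' zone) combined arithmetically as total + (score_3p - 1) * near.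
import Mathlib
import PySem

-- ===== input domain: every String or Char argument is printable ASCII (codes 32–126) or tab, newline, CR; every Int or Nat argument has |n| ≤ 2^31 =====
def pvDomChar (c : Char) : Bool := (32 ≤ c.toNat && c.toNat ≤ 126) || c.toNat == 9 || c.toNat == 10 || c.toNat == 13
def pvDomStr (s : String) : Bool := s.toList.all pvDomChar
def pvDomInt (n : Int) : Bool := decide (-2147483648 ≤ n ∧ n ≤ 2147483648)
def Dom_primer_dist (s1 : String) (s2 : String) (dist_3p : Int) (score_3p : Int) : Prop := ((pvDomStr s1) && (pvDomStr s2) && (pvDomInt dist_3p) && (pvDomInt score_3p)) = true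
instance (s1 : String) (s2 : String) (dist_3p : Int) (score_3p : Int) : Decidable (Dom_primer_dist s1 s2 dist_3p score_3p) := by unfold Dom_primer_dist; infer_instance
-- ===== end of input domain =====

-- B replaces A's per-position branch with two region-level mismatch counts (whole
-- overlap, and the clamped 3' zone) combined arithmetically; objective: simpler.

-- ===== PORT A =====
-- A: enumerate over zip of the two reversed strings, branching per mismatch on index < dist_3p.
def primer_dist (s1 : String) (s2 : String) (dist_3p : Int) (score_3p : Int) : Int :=
  (PySem.List.enumerate (s1.toList.reverse.zip s2.toList.reverse)).foldl
    (fun score p =>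
      if p.2.1 ≠ p.2.2 then
        if p.1 < dist_3p then score + score_3p else score + 1
      else score) 0

-- ===== PORT B =====
-- B: align the last n = min(len) characters, count mismatches over that region and
-- over the clamped 3' zone of size k, return total + (score_3p - 1) * near.
def primer_dist_alt (s1 : String) (s2 : String) (dist_3p : Int) (score_3p : Int) : Int :=
  let l1 := s1.toList
  let l2 := s2.toList
  let n := min l1.length l2.length
  let t1 := l1.drop (l1.length - n)
  let t2 := l2.drop (l2.length - n)
  let total : Int := (((t1.zip t2).filter (fun p => p.1 ≠ p.2)).length : Int)
  let k : Int := max 0 (min (n : Int) dist_3p)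
  let near : Int :=
    ((((t1.drop (n - k.toNat)).zip (t2.drop (n - k.toNat))).filter (fun p => p.1 ≠ p.2)).length : Int)
  total + (score_3p - 1) * near

-- ===== PRECONDITION & SPEC =====
def Spec_primer_dist (s1 : String) (s2 : String) (dist_3p : Int) (score_3p : Int) (out : Int) : Prop := out = primer_dist_alt s1 s2 dist_3p score_3p
instance (s1 : String) (s2 : String) (dist_3p : Int) (score_3p : Int) (out : Int) : Decidable (Spec_primer_dist s1 s2 dist_3p score_3p out) := by unfold Spec_primer_dist; infer_instance

-- ===== CLAIM (what is proved, stated in full; the proofs are below) =====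
def Claim_equal_primer_dist : Prop := ∀ (s1 : String) (s2 : String) (dist_3p : Int) (score_3p : Int), Dom_primer_dist s1 s2 dist_3p score_3p → Spec_primer_dist s1 s2 dist_3p score_3p (primer_dist s1 s2 dist_3p score_3p)

-- ===== LEMMAS AND PROOFS =====

-- mismatch count of a list of character pairs
def pvMis (zs : List (Char × Char)) : Int :=
  ((zs.filter (fun p => p.1 ≠ p.2)).length : Int)

theorem pvMis_cons (p : Char × Char) (zs : List (Char × Char)) :
    pvMis (p :: zs) = (if p.1 ≠ p.2 then 1 else 0) + pvMis zs := by
  by_cases hm : p.1 = p.2 <;> simp [pvMis, hm] <;> ring_nf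

-- A's loop, re-expressed with the remaining 3'-distance carried along
def pvH (sp : Int) : List (Char × Char) → Int → Int
  | [], _ => 0
  | p :: t, d => (if p.1 ≠ p.2 then (if 0 < d then sp else 1) else 0) + pvH sp t (d - 1)

theorem pvFold_eq_pvH (sp d : Int) (zs : List (Char × Char)) (j acc : Int) :
    (PySem.List.enumerate zs j).foldl
      (fun score p =>
        if p.2.1 ≠ p.2.2 then
          if p.1 < d then score + sp else score + 1
        else score) acc
    = acc + pvH sp zs (d - j) := by
  induction zs generalizing j acc with
  | nil => simp [PySem.List.enumerate_nil, pvH]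
  | cons q t ih =>
    rw [PySem.List.enumerate_cons, List.foldl_cons, ih]
    have hd : d - (j + 1) = (d - j) - 1 := by ring
    rw [hd]
    by_cases hm : q.1 = q.2
    · simp [pvH, hm]
    · by_cases hj : j < d
      · have h0 : 0 < d - j := by omega
        simp [pvH, hm, hj]; ring
      · have h0 : ¬ 0 < d - j := by omega
        simp [pvH, hm, hj]; ring

theorem pvH_closed (sp : Int) (zs : List (Char × Char)) (d : Int) :
    pvH sp zs d = pvMis zs + (sp - 1) * pvMis (zs.take (max 0 (min (zs.length : Int) d)).toNat) := by
  induction zs generalizing d with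
  | nil => simp [pvH, pvMis]
  | cons p t ih =>
    by_cases h0 : 0 < d
    · have hkpos : (max 0 (min (((p :: t).length : Nat) : Int) d)).toNat
          = (max 0 (min ((t.length : Nat) : Int) (d - 1))).toNat + 1 := by
        simp only [List.length_cons]; omega
      rw [show pvH sp (p :: t) d
            = (if p.1 ≠ p.2 then (if 0 < d then sp else 1) else 0) + pvH sp t (d - 1) from rfl,
          ih (d - 1), hkpos, List.take_succ_cons, pvMis_cons, pvMis_cons]
      by_cases hm : p.1 = p.2 <;> simp [hm, h0] <;> ring
    · have hk0 : (max 0 (min (((p :: t).length : Nat) : Int) d)).toNat = 0 := by omega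
      have hk0t : (max 0 (min ((t.length : Nat) : Int) (d - 1))).toNat = 0 := by omega
      rw [show pvH sp (p :: t) d
            = (if p.1 ≠ p.2 then (if 0 < d then sp else 1) else 0) + pvH sp t (d - 1) from rfl,
          ih (d - 1), hk0, hk0t, List.take_zero, List.take_zero, pvMis_cons]
      by_cases hm : p.1 = p.2 <;> simp [hm, h0, pvMis] <;> ring_nf

theorem pvZip_reverse (l1 : List Char) (l2 : List Char) (h : l1.length = l2.length) :
    l1.reverse.zip l2.reverse = (l1.zip l2).reverse := by
  induction l1 generalizing l2 with
  | nil => cases l2 <;> simp_all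
  | cons a t ih =>
    cases l2 with
    | nil => simp_all
    | cons b u =>
      simp only [List.length_cons, Nat.add_right_cancel_iff] at h
      simp only [List.reverse_cons, List.zip_cons_cons, List.reverse_cons]
      rw [List.zip_append (by simp [h]), ih u h]
      simp

theorem pvDrop_zip (m : Nat) (l1 l2 : List Char) :
    (l1.drop m).zip (l2.drop m) = (l1.zip l2).drop m := by
  induction m generalizing l1 l2 with
  | zero => simp
  | succ k ih =>
    cases l1 with
    | nil => simp
    | cons a t =>
      cases l2 with
      | nil => simp
      | cons b u => simpa using ih t u

theorem pvMis_reverse (zs : List (Char × Char)) : pvMis zs.reverse = pvMis zs := by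
  simp [pvMis, List.filter_reverse]

-- the reversed-zip seen by A is the reverse of the overlap zip that B builds
theorem pvRevZip (l1 l2 : List Char) :
    l1.reverse.zip l2.reverse
      = ((l1.drop (l1.length - min l1.length l2.length)).zip
         (l2.drop (l2.length - min l1.length l2.length))).reverse := by
  set n := min l1.length l2.length with hn
  have h1 : (l1.drop (l1.length - n)).length = n := by
    simp [List.length_drop]; omega
  have h2 : (l2.drop (l2.length - n)).length = n := by
    simp [List.length_drop]; omega
  have hsplit1 : l1.reverse
      = (l1.drop (l1.length - n)).reverse ++ (l1.take (l1.length - n)).reverse := by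
    rw [← List.reverse_append, List.take_append_drop]
  have hsplit2 : l2.reverse
      = (l2.drop (l2.length - n)).reverse ++ (l2.take (l2.length - n)).reverse := by
    rw [← List.reverse_append, List.take_append_drop]
  rw [hsplit1, hsplit2, List.zip_append (by simp [h1, h2])]
  have hnil : (l1.take (l1.length - n)).reverse.zip (l2.take (l2.length - n)).reverse = [] := by
    rcases le_total l1.length l2.length with hle | hle
    · have : l1.length - n = 0 := by omega
      simp [this]
    · have : l2.length - n = 0 := by omega
      simp [this]
  rw [hnil, List.append_nil, pvZip_reverse _ _ (h1.trans h2.symm)]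

theorem primer_dist_eq_alt (s1 s2 : String) (d sp : Int) :
    primer_dist s1 s2 d sp = primer_dist_alt s1 s2 d sp := by
  unfold primer_dist primer_dist_alt
  dsimp only
  set l1 := s1.toList
  set l2 := s2.toList
  set n := min l1.length l2.length with hn
  set t1 := l1.drop (l1.length - n) with ht1
  set t2 := l2.drop (l2.length - n) with ht2
  have h1 : t1.length = n := by simp [ht1, List.length_drop]; omega
  have h2 : t2.length = n := by simp [ht2, List.length_drop]; omega
  have hrev : l1.reverse.zip l2.reverse = (t1.zip t2).reverse := pvRevZip l1 l2
  rw [pvFold_eq_pvH sp d _ 0 0, hrev, sub_zero, zero_add, pvH_closed]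
  set zs := t1.zip t2 with hzs
  have hlen : zs.length = n := by simp [hzs, List.length_zip, h1, h2]
  set k : Int := max 0 (min (n : Int) d) with hkdef
  have hz : zs.reverse.length = n := by simp [hlen]
  have hkk : (max 0 (min ((zs.reverse.length : Nat) : Int) d)).toNat = k.toNat := by
    rw [hz]
  have hkn : k.toNat ≤ n := by omega
  have htake : zs.reverse.take k.toNat = (zs.drop (n - k.toNat)).reverse := by
    rw [List.reverse_drop, hlen, show n - (n - k.toNat) = k.toNat by omega]
  rw [hkk, htake, pvMis_reverse, pvMis_reverse, pvDrop_zip, ← hzs]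
  simp [pvMis]

-- ===== VERDICT (by name: the statement is the Claim_ definition above) =====
theorem primer_dist_spec : Claim_equal_primer_dist := by
  intro s1 s2 d sp _
  exact primer_dist_eq_alt s1 s2 d sp
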